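-- pv_equiv track=rewrite | github.com/QHHJ/finance-agent | app/services/extractor.py | _strip_suffix_ignore_spaces
-- ===== SOURCE A (Python) =====
-- def _strip_suffix_ignore_spaces(text: str, suffix: str) -> str:
--     source = text
--     target = suffix.replace(" ", "")
--     if not target:
--         return source
--     for idx in range(len(source) + 1):
--         part = source[idx:]
--         if part.replace(" ", "") == target:
--             return source[:idx]
--     return source
-- ===== SOURCE B (Python) =====
-- def _strip_suffix_ignore_spaces(text: str, suffix: str) -> str:
--     # Single backward pass: match target's chars from the end of text,
--     # skipping spaces, then absorb the run of spaces just before the match.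
--     target = suffix.replace(" ", "")
--     if not target:
--         return text
--     i = len(text) - 1
--     k = len(target) - 1
--     while k >= 0:
--         if i < 0:
--             return text
--         c = text[i]
--         i -= 1
--         if c == " ":
--             continue
--         if c != target[k]:
--             return text
--         k -= 1
--     while i >= 0 and text[i] == " ":
--         i -= 1
--     return text[:i + 1]
-- ===== Notes on version B (the rewrite author's own statement) =====
-- stated objective: faster
-- what changed: A tries every split index and space-strips the whole remaining suffix each time (quadratic); B makes one backward pass over the text matching the space-stripped suffix's characters from the end while skipping spaces, then absorbs the preceding run of spaces, so no repeated re-scanning occurs.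
import Mathlib
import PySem

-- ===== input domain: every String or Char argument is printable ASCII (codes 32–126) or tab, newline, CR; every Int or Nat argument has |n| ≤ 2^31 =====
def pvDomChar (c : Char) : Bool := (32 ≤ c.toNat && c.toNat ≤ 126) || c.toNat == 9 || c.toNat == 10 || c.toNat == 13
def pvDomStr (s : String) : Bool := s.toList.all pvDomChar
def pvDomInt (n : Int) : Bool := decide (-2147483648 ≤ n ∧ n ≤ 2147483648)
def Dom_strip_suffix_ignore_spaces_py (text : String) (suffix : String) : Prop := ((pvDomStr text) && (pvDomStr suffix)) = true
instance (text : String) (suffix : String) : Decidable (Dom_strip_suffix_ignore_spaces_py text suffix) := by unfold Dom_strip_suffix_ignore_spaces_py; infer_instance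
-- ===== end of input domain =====

-- B replaces A's quadratic try-every-split-index scan by a single backward pass
-- over the text (objective: faster; a timing run measures the speed-up).


-- ===== PORT A =====
-- A's 'for idx in range(len(source)+1): part = source[idx:]; if part.replace(" ","") == target: return source[:idx]'
-- ported as structural recursion on the suffix, accumulating source[:idx] (same checks in the same order, idx increasing).
def pvAAux (target : List Char) : List Char → Option (List Char)
  | [] => if PySem.Chars.replace [] [' '] [] = target then some [] else none
  | c :: xs =>
      if PySem.Chars.replace (c :: xs) [' '] [] = target then some []
      else (pvAAux target xs).map (c :: ·)

def strip_suffix_ignore_spaces_py (text : String) (suffix : String) : String :=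
  let target := PySem.Chars.replace suffix.toList " ".toList "".toList
  if target = [] then text
  else
    match pvAAux target text.toList with
    | some p => String.ofList p
    | none => text

-- ===== PORT B =====
-- Source B walks indices i, k backward through text and target; ported as structural
-- recursion over the REVERSED lists, which visits the same characters in the
-- same order with the same comparisons (exact).
def pvBMatch : List Char → List Char → Option (List Char)
  | rt, [] => some rt
  | [], _ :: _ => none
  | c :: rt, t :: ts =>
      if c = ' ' then pvBMatch rt (t :: ts)
      else if c = t then pvBMatch rt ts
      else none

-- Source B's final 'while i >= 0 and text[i] == " ": i -= 1'
def pvBSkip : List Char → List Char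
  | [] => []
  | c :: rt => if c = ' ' then pvBSkip rt else c :: rt

def strip_suffix_ignore_spaces_py_alt (text : String) (suffix : String) : String :=
  let target := PySem.Chars.replace suffix.toList " ".toList "".toList
  if target = [] then text
  else
    match pvBMatch text.toList.reverse target.reverse with
    | none => text
    | some rest => String.ofList (pvBSkip rest).reverse

-- ===== PRECONDITION & SPEC =====
def Spec_strip_suffix_ignore_spaces_py (text : String) (suffix : String) (out : String) : Prop := out = strip_suffix_ignore_spaces_py_alt text suffix
instance (text : String) (suffix : String) (out : String) : Decidable (Spec_strip_suffix_ignore_spaces_py text suffix out) := by unfold Spec_strip_suffix_ignore_spaces_py; infer_instance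

-- ===== CLAIM (what is proved, stated in full; the proofs are below) =====
def Claim_equal_strip_suffix_ignore_spaces_py : Prop := ∀ (text : String) (suffix : String), Dom_strip_suffix_ignore_spaces_py text suffix → Spec_strip_suffix_ignore_spaces_py text suffix (strip_suffix_ignore_spaces_py text suffix)

-- ===== LEMMAS AND PROOFS =====

-- replace(" ", "") is exactly the filter that drops spaces
lemma pvReplace_go_filter : ∀ (fuel : Nat) (l acc : List Char), l.length ≤ fuel →
    PySem.Chars.replace.go [' '] [] fuel l acc = acc.reverse ++ l.filter (· != ' ') := by
  intro fuel
  induction fuel with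
  | zero =>
      intro l acc h
      have : l = [] := List.eq_nil_of_length_eq_zero (Nat.le_zero.mp h)
      subst this
      simp [PySem.Chars.replace.go]
  | succ n ih =>
      intro l acc h
      cases l with
      | nil => simp [PySem.Chars.replace.go]
      | cons c t =>
          by_cases hc : c = ' '
          · subst hc
            have hpre : List.isPrefixOf [' '] (' ' :: t) = true := by simp [List.isPrefixOf]
            simp only [PySem.Chars.replace.go, hpre, if_pos]
            have e1 : List.drop [' '].length (' ' :: t) = t := rfl
            have e2 : ([] : List Char).reverse ++ acc = acc := by simp
            rw [e1, e2, ih t acc (by simpa using h)]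
            simp
          · have hpre : List.isPrefixOf [' '] (c :: t) = false := by
              simp [List.isPrefixOf]; exact fun h' => hc h'.symm
            simp only [PySem.Chars.replace.go, hpre]
            rw [if_neg (by simp), ih t (c :: acc) (by simpa using h)]
            simp [hc]

lemma pvReplace_eq_filter (cs : List Char) :
    PySem.Chars.replace cs [' '] [] = cs.filter (· != ' ') := by
  unfold PySem.Chars.replace
  simpa using pvReplace_go_filter cs.length cs [] le_rfl

-- proof-only refinement of pvBMatch remembering HOW a match failed:
-- some (inl rest) = success with rest of the reversed text left over;
-- some (inr left) = reversed text exhausted with 'left' target chars unmatched;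
-- none            = a character mismatch (absorbing).
def pvBMFull : List Char → List Char → Option (List Char ⊕ List Char)
  | rt, [] => some (Sum.inl rt)
  | [], t :: ts => some (Sum.inr (t :: ts))
  | c :: rt, t :: ts =>
      if c = ' ' then pvBMFull rt (t :: ts)
      else if c = t then pvBMFull rt ts
      else none

-- how B's two result-shaping steps read a pvBMFull outcome
def pvPost : Option (List Char ⊕ List Char) → Option (List Char)
  | some (.inl rest) => some ((pvBSkip rest).reverse)
  | _ => none

@[simp] lemma pvPost_inl (rest : List Char) : pvPost (some (.inl rest)) = some ((pvBSkip rest).reverse) := rfl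
@[simp] lemma pvPost_inr (left : List Char) : pvPost (some (.inr left)) = none := rfl
@[simp] lemma pvPost_none : pvPost none = none := rfl

lemma pvBMatch_eq_full : ∀ (rt tt : List Char),
    pvBMatch rt tt = (pvBMFull rt tt).bind (fun r => match r with | .inl rest => some rest | .inr _ => none) := by
  intro rt
  induction rt with
  | nil => intro tt; cases tt <;> simp [pvBMatch, pvBMFull]
  | cons c r ih =>
      intro tt
      cases tt with
      | nil => simp [pvBMatch, pvBMFull]
      | cons t ts =>
          by_cases hc : c = ' '
          · simp [pvBMatch, pvBMFull, hc, ih]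
          · by_cases ht : c = t
            · subst ht; simp [pvBMatch, pvBMFull, hc, ih]
            · simp [pvBMatch, pvBMFull, hc, ht]

lemma pvBMFull_append : ∀ (r s tt : List Char),
    pvBMFull (r ++ s) tt =
      match pvBMFull r tt with
      | some (.inl rest) => some (Sum.inl (rest ++ s))
      | some (.inr left) => pvBMFull s left
      | none => none := by
  intro r
  induction r with
  | nil => intro s tt; cases tt <;> simp [pvBMFull]
  | cons c r ih =>
      intro s tt
      cases tt with
      | nil => simp [pvBMFull]
      | cons t ts =>
          by_cases hc : c = ' '
          · simp [pvBMFull, hc, ih]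
          · by_cases ht : c = t
            · subst ht; simp [pvBMFull, hc, ih]
            · simp [pvBMFull, hc, ht]

-- success decomposition: the consumed part of rt filters to exactly tt
lemma pvBMFull_inl_decomp : ∀ (rt tt rest : List Char),
    pvBMFull rt tt = some (Sum.inl rest) →
    ∃ con, rt = con ++ rest ∧ con.filter (· != ' ') = tt := by
  intro rt
  induction rt with
  | nil =>
      intro tt rest h
      cases tt with
      | nil =>
          simp only [pvBMFull, Option.some.injEq, Sum.inl.injEq] at h
          exact ⟨[], by simp [← h], by simp⟩
      | cons t ts => simp [pvBMFull] at h
  | cons c r ih =>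
      intro tt rest h
      cases tt with
      | nil =>
          simp only [pvBMFull, Option.some.injEq, Sum.inl.injEq] at h
          exact ⟨[], by simp [← h], by simp⟩
      | cons t ts =>
          by_cases hc : c = ' '
          · rw [show pvBMFull (c :: r) (t :: ts) = pvBMFull r (t :: ts) by simp [pvBMFull, hc]] at h
            obtain ⟨con, hr, hf⟩ := ih (t :: ts) rest h
            exact ⟨c :: con, by simp [hr], by simp [hc, hf]⟩
          · by_cases ht : c = t
            · subst ht
              rw [show pvBMFull (c :: r) (c :: ts) = pvBMFull r ts by simp [pvBMFull, hc]] at h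
              obtain ⟨con, hr, hf⟩ := ih ts rest h
              exact ⟨c :: con, by simp [hr], by simp [hc, hf]⟩
            · simp [pvBMFull, hc, ht] at h

-- exhaustion decomposition: everything in rt matched and 'left' is still owed
lemma pvBMFull_inr_decomp : ∀ (rt tt left : List Char),
    pvBMFull rt tt = some (Sum.inr left) →
    tt = rt.filter (· != ' ') ++ left ∧ left ≠ [] := by
  intro rt
  induction rt with
  | nil =>
      intro tt left h
      cases tt with
      | nil => simp [pvBMFull] at h
      | cons t ts =>
          simp only [pvBMFull, Option.some.injEq, Sum.inr.injEq] at h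
          exact ⟨by simp [h], by simp [← h]⟩
  | cons c r ih =>
      intro tt left h
      cases tt with
      | nil => simp [pvBMFull] at h
      | cons t ts =>
          by_cases hc : c = ' '
          · rw [show pvBMFull (c :: r) (t :: ts) = pvBMFull r (t :: ts) by simp [pvBMFull, hc]] at h
            obtain ⟨h1, h2⟩ := ih (t :: ts) left h
            exact ⟨by simpa [hc] using h1, h2⟩
          · by_cases ht : c = t
            · subst ht
              rw [show pvBMFull (c :: r) (c :: ts) = pvBMFull r ts by simp [pvBMFull, hc]] at h
              obtain ⟨h1, h2⟩ := ih ts left h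
              exact ⟨by simp [hc, h1], h2⟩
            · simp [pvBMFull, hc, ht] at h

-- a full-text match never ends in the mismatch state
lemma pvBMFull_ne_none_of_filter : ∀ (rt : List Char),
    pvBMFull rt (rt.filter (· != ' ')) ≠ none := by
  intro rt
  induction rt with
  | nil => simp [pvBMFull]
  | cons c r ih =>
      by_cases hc : c = ' '
      · subst hc
        have hf : (' ' :: r).filter (· != ' ') = r.filter (· != ' ') := by simp
        rw [hf]
        cases hfr : r.filter (· != ' ') with
        | nil => simp [pvBMFull]
        | cons t ts =>
            rw [show pvBMFull (' ' :: r) (t :: ts) = pvBMFull r (t :: ts) by simp [pvBMFull]]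
            rw [← hfr]; exact ih
      · have hf : (c :: r).filter (· != ' ') = c :: r.filter (· != ' ') := by simp [hc]
        rw [hf, show pvBMFull (c :: r) (c :: r.filter (· != ' ')) = pvBMFull r (r.filter (· != ' ')) by
              simp [pvBMFull, hc]]
        exact ih

lemma pvBSkip_eq_nil_iff : ∀ (r : List Char), pvBSkip r = [] ↔ r.filter (· != ' ') = [] := by
  intro r
  induction r with
  | nil => simp [pvBSkip]
  | cons c t ih =>
      by_cases hc : c = ' '
      · subst hc; simp [pvBSkip, ih]
      · have hb : (c != ' ') = true := by simp [hc]
        simp [pvBSkip, hb, hc]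

lemma pvBSkip_append_singleton (r : List Char) (c : Char) :
    pvBSkip (r ++ [c]) = if pvBSkip r = [] ∧ c = ' ' then [] else pvBSkip r ++ [c] := by
  induction r with
  | nil => by_cases hc : c = ' ' <;> simp [pvBSkip, hc]
  | cons d t ih =>
      by_cases hd : d = ' '
      · simpa [pvBSkip, hd] using ih
      · simp [pvBSkip, hd]

-- B's whole computation agrees with A's loop, as a function of the source
lemma pvMain (target : List Char) (hne : target ≠ []) :
    ∀ src : List Char,
      pvAAux target src = pvPost (pvBMFull src.reverse target.reverse) := by
  intro src
  induction src with
  | nil =>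
      have h0 : pvBMFull ([] : List Char) target.reverse = some (Sum.inr target.reverse) := by
        cases h : target.reverse with
        | nil => exact absurd (by simpa using h) hne
        | cons t ts => simp [pvBMFull]
      simp [pvAAux, pvReplace_eq_filter, h0, (by simpa using hne : [] ≠ target)]
  | cons c xs ih =>
      have hrev : (c :: xs).reverse = xs.reverse ++ [c] := by simp
      have happ := pvBMFull_append xs.reverse [c] target.reverse
      -- relates A's whole-string check to the reversed filtered string
      have hwhole : PySem.Chars.replace (c :: xs) [' '] [] = target ↔
          (xs.reverse ++ [c]).filter (· != ' ') = target.reverse := by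
        rw [pvReplace_eq_filter,
          show xs.reverse ++ [c] = (c :: xs).reverse by simp, List.filter_reverse]
        exact List.reverse_inj.symm
      rw [hrev, happ]
      cases hfull : pvBMFull xs.reverse target.reverse with
      | none =>
          -- mismatch is absorbing; the whole string cannot match either
          have hno : ¬ PySem.Chars.replace (c :: xs) [' '] [] = target := by
            rw [hwhole]
            intro h
            have h2 := pvBMFull_ne_none_of_filter (xs.reverse ++ [c])
            rw [h] at h2
            rw [happ, hfull] at h2
            exact h2 rfl
          rw [show pvAAux target (c :: xs) = (pvAAux target xs).map (c :: ·) by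
                simp [pvAAux, hno]]
          rw [ih, hfull]
          simp
      | some st =>
          cases st with
          | inl rest =>
              obtain ⟨con, hcon, hconf⟩ := pvBMFull_inl_decomp _ _ _ hfull
              -- whole-string match ⟺ rest ++ [c] is all spaces
              have hsplit : (xs.reverse ++ [c]).filter (· != ' ') =
                  target.reverse ++ (rest ++ [c]).filter (· != ' ') := by
                rw [hcon]; simp [List.filter_append, hconf]
              have hw2 : PySem.Chars.replace (c :: xs) [' '] [] = target ↔
                  (rest ++ [c]).filter (· != ' ') = [] := by
                rw [hwhole, hsplit]
                constructor
                · intro h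
                  have h3 : target.reverse ++ (rest ++ [c]).filter (· != ' ') =
                      target.reverse ++ [] := by simpa using h
                  exact List.append_cancel_left h3
                · intro h; simp [h]
              by_cases hm : PySem.Chars.replace (c :: xs) [' '] [] = target
              · have hsk : pvBSkip (rest ++ [c]) = [] := by
                  rw [pvBSkip_eq_nil_iff]; exact hw2.mp hm
                rw [show pvAAux target (c :: xs) = some [] by simp [pvAAux, hm]]
                simp [hsk]
              · have hsk : ¬ pvBSkip (rest ++ [c]) = [] := by
                  rw [pvBSkip_eq_nil_iff]; exact fun h => hm (hw2.mpr h)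
                have hsk2 : pvBSkip (rest ++ [c]) = pvBSkip rest ++ [c] := by
                  rw [pvBSkip_append_singleton]
                  split_ifs with h
                  · exact absurd (by rw [pvBSkip_append_singleton]; simp [h]) hsk
                  · rfl
                rw [show pvAAux target (c :: xs) = (pvAAux target xs).map (c :: ·) by
                      simp [pvAAux, hm]]
                rw [ih, hfull]
                simp [hsk2]
          | inr left =>
              obtain ⟨hleft, hlne⟩ := pvBMFull_inr_decomp _ _ _ hfull
              -- whole-string match ⟺ the one new char pays off the whole debt
              have hw2 : PySem.Chars.replace (c :: xs) [' '] [] = target ↔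
                  List.filter (· != ' ') [c] = left := by
                rw [hwhole]
                constructor
                · intro h
                  have h3 : xs.reverse.filter (· != ' ') ++ List.filter (· != ' ') [c] =
                      xs.reverse.filter (· != ' ') ++ left := by
                    rw [← List.filter_append, h, hleft]
                  exact List.append_cancel_left h3
                · intro h
                  rw [List.filter_append, h, hleft]
              by_cases hm : PySem.Chars.replace (c :: xs) [' '] [] = target
              · have h0 := hw2.mp hm
                have hcns : c ≠ ' ' := by
                  intro h; subst h
                  simp at h0
                  exact hlne h0
                have hlc : left = [c] := by rw [← h0]; simp [hcns]
                rw [show pvAAux target (c :: xs) = some [] by simp [pvAAux, hm]]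
                subst hlc
                simp [pvBMFull, hcns, pvBSkip]
              · rw [show pvAAux target (c :: xs) = (pvAAux target xs).map (c :: ·) by
                      simp [pvAAux, hm]]
                rw [ih, hfull]
                -- LHS is none; show pvBMFull [c] left is not a success either
                cases left with
                | nil => exact absurd rfl hlne
                | cons l ls =>
                    by_cases hc : c = ' '
                    · simp [pvBMFull, hc]
                    · by_cases hl : c = l
                      · subst hl
                        cases ls with
                        | nil => exact absurd (hw2.mpr (by simp [hc])) hm
                        | cons a b => simp [pvBMFull, hc]
                      · simp [pvBMFull, hc, hl]

-- ===== VERDICT (by name: the statement is the Claim_ definition above) =====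
theorem strip_suffix_ignore_spaces_py_spec : Claim_equal_strip_suffix_ignore_spaces_py := by
  intro text suffix _
  unfold Spec_strip_suffix_ignore_spaces_py
  unfold strip_suffix_ignore_spaces_py strip_suffix_ignore_spaces_py_alt
  simp only []
  rw [show (" " : String).toList = [' '] from rfl, show ("" : String).toList = ([] : List Char) from rfl]
  by_cases h : PySem.Chars.replace suffix.toList [' '] [] = []
  · simp [h]
  · rw [if_neg h, if_neg h]
    rw [pvMain _ h text.toList, pvBMatch_eq_full]
    cases pvBMFull text.toList.reverse (PySem.Chars.replace suffix.toList [' '] []).reverse with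
    | none => simp
    | some st => cases st <;> simp
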